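-- pv_equiv track=rewrite | github.com/ansible/ansible | test/lib/ansible_test/_internal/util.py | filter_args
-- ===== SOURCE A (Python) =====
-- def filter_args(args: list[str], filters: dict[str, int]) -> list[str]:
--     """Return a filtered version of the given command line arguments."""
--     remaining = 0
--     result = []
--
--     for arg in args:
--         if not arg.startswith('-') and remaining:
--             remaining -= 1
--             continue
--
--         remaining = 0
--
--         parts = arg.split('=', 1)
--         key = parts[0]
--
--         if key in filters:
--             remaining = filters[key] - len(parts) + 1
--             continue
--
--         result.append(arg)
--
--     return result
-- ===== SOURCE B (Python) =====
-- def filter_args(args: list[str], filters: dict[str, int]) -> list[str]: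
--     """Return a filtered version of the given command line arguments."""
--     result = []
--     i = 0
--     n = len(args)
--     while i < n:
--         arg = args[i]
--         parts = arg.split('=', 1)
--         i += 1
--         if parts[0] in filters:
--             need = filters[parts[0]] - len(parts) + 1
--             while need and i < n and not args[i].startswith('-'):
--                 i += 1
--                 need -= 1
--         else:
--             result.append(arg)
--     return result
-- ===== Notes on version B (the rewrite author's own statement) =====
-- stated objective: alternative
-- what changed: Replaces the fold carrying a 'remaining' counter through every iteration with an explicit index and a nested inner while-loop that consumes a filter's value arguments on the spot, so consumed values are never re-dispatched through the main loop's branches.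
import Mathlib
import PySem

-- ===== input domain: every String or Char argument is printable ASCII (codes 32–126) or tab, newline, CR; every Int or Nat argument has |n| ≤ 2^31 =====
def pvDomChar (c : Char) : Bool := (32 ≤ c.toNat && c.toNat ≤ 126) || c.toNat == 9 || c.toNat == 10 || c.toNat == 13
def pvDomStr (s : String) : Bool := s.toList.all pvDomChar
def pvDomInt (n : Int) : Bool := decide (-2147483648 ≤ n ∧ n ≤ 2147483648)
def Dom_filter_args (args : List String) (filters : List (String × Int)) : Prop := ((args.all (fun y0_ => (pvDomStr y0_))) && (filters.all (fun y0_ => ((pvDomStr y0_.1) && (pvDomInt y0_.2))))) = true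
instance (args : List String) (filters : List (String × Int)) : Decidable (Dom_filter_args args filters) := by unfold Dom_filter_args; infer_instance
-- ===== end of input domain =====

-- B restructures A's single fold (which threads a 'remaining' counter through every
-- iteration) into an outer loop with a nested inner loop that consumes a filter's
-- value arguments immediately; same values, alternative decomposition.

-- ===== PORT A =====
-- one iteration of A's for-loop: state is (remaining, result)
def filterArgsStepA (filters : List (String × Int)) (st : Int × List String) (arg : String) : Int × List String :=
  if ¬ (PySem.Str.startswith arg "-") ∧ st.1 ≠ 0 then
    (st.1 - 1, st.2)
  else
    -- remaining = 0; parts = arg.split('=', 1); key = parts[0]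
    let parts := (PySem.Str.splitMax? arg "=" 1).getD []   -- sep "=" ≠ "" so never none
    let key := parts.headD ""                               -- parts is never empty
    match (PySem.Dict.mk filters).get? key with
    | some v => (v - parts.length + 1, st.2)
    | none => (0, st.2 ++ [arg])

def filter_args (args : List String) (filters : List (String × Int)) : List String :=
  (args.foldl (filterArgsStepA filters) (0, [])).2

-- ===== PORT B =====
-- the inner while-loop: skip value args while need is truthy and the arg has no '-' prefix
def filterArgsConsumeB (need : Int) : List String → List String
  | [] => []
  | x :: rest =>
    if need ≠ 0 ∧ ¬ (PySem.Str.startswith x "-") then filterArgsConsumeB (need - 1) rest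
    else x :: rest

theorem filterArgsConsumeB_length_le (need : Int) (xs : List String) :
    (filterArgsConsumeB need xs).length ≤ xs.length := by
  induction xs generalizing need with
  | nil => simp [filterArgsConsumeB]
  | cons x rest ih =>
    simp only [filterArgsConsumeB]
    split
    · exact Nat.le_succ_of_le (ih _)
    · simp

-- the outer while-loop over the remaining suffix of args
def filterArgsMainB (filters : List (String × Int)) : List String → List String
  | [] => []
  | arg :: rest =>
    let parts := (PySem.Str.splitMax? arg "=" 1).getD []
    match (PySem.Dict.mk filters).get? (parts.headD "") with
    | some v => filterArgsMainB filters (filterArgsConsumeB (v - parts.length + 1) rest)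
    | none => arg :: filterArgsMainB filters rest
termination_by xs => xs.length
decreasing_by
  · exact Nat.lt_succ_of_le (filterArgsConsumeB_length_le _ _)
  · simp

def filter_args_alt (args : List String) (filters : List (String × Int)) : List String :=
  filterArgsMainB filters args

-- ===== PRECONDITION & SPEC =====
def Spec_filter_args (args : List String) (filters : List (String × Int)) (out : List String) : Prop := out = filter_args_alt args filters
instance (args : List String) (filters : List (String × Int)) (out : List String) : Decidable (Spec_filter_args args filters out) := by unfold Spec_filter_args; infer_instance

-- ===== CLAIM (what is proved, stated in full; the proofs are below) =====
def Claim_equal_filter_args : Prop := ∀ (args : List String) (filters : List (String × Int)), Dom_filter_args args filters → Spec_filter_args args filters (filter_args args filters)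

-- ===== LEMMAS AND PROOFS =====

theorem filterArgsConsumeB_zero (xs : List String) : filterArgsConsumeB 0 xs = xs := by
  cases xs with
  | nil => rfl
  | cons y t => unfold filterArgsConsumeB; rw [if_neg (by simp)]

-- the key invariant: folding A's step from state (remaining, acc) over xs appends exactly
-- what B produces after its inner loop consumes the 'remaining' leading value args
theorem foldA_eq_B (filters : List (String × Int)) (xs : List String) :
    ∀ (remaining : Int) (acc : List String),
      (xs.foldl (filterArgsStepA filters) (remaining, acc)).2
        = acc ++ filterArgsMainB filters (filterArgsConsumeB remaining xs) := by
  induction xs with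
  | nil => intro remaining acc; simp [filterArgsConsumeB, filterArgsMainB]
  | cons x rest ih =>
    intro remaining acc
    by_cases h : ¬ (PySem.Str.startswith x "-") ∧ remaining ≠ 0
    · -- A consumes x; B's inner loop consumes x too
      have hstep : filterArgsStepA filters (remaining, acc) x = (remaining - 1, acc) := by
        unfold filterArgsStepA; rw [if_pos h]
      rw [List.foldl_cons, hstep, ih]
      have hc : filterArgsConsumeB remaining (x :: rest) = filterArgsConsumeB (remaining - 1) rest := by
        unfold filterArgsConsumeB; rw [if_pos ⟨h.2, h.1⟩]; cases rest <;> rfl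
      rw [hc]
    · -- A resets remaining and dispatches x; B's inner loop stops at x
      have hc : filterArgsConsumeB remaining (x :: rest) = x :: rest := by
        unfold filterArgsConsumeB; rw [if_neg (by tauto)]
      rw [hc, List.foldl_cons]
      have hstep : filterArgsStepA filters (remaining, acc) x =
          (let parts := (PySem.Str.splitMax? x "=" 1).getD []
           match (PySem.Dict.mk filters).get? (parts.headD "") with
           | some v => ((v : Int) - parts.length + 1, acc)
           | none => (0, acc ++ [x])) := by
        unfold filterArgsStepA; rw [if_neg h]
      rw [hstep]
      cases hg : (PySem.Dict.mk filters).get? (((PySem.Str.splitMax? x "=" 1).getD []).headD "") with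
      | some v =>
        simp only [hg, ih]
        conv_rhs => rw [filterArgsMainB]
        simp only [hg]
      | none =>
        simp only [hg, ih]
        conv_rhs => rw [filterArgsMainB]
        simp only [hg]
        rw [filterArgsConsumeB_zero]
        simp

-- ===== VERDICT (by name: the statement is the Claim_ definition above) =====
theorem filter_args_spec : Claim_equal_filter_args := by
  intro args filters _
  unfold Spec_filter_args filter_args filter_args_alt
  rw [foldA_eq_B, filterArgsConsumeB_zero]
  simp
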